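-- pv_equiv track=rewrite | github.com/shawnyin128/arbor | scripts/plugin_trigger_adapters.py | normalize_single_value_option
-- ===== SOURCE A (Python) =====
-- def normalize_single_value_option(args: list[str], option_name: str) -> list[str]:
--     normalized: list[str] = []
--     index = 0
--     while index < len(args):
--         arg = args[index]
--         if arg == option_name:
--             if index + 1 < len(args):
--                 value = args[index + 1].strip()
--                 if should_keep_single_value_option(value):
--                     normalized.append(f"{option_name}={value}")
--                 index += 2
--             else:
--                 index += 1
--             continue
--         if arg.startswith(f"{option_name} "):
--             value = arg.removeprefix(f"{option_name} ").strip()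
--             if should_keep_single_value_option(value):
--                 normalized.append(f"{option_name}={value}")
--         elif arg.startswith(f"{option_name}="):
--             value = arg.split("=", 1)[1].strip()
--             if should_keep_single_value_option(value):
--                 normalized.append(f"{option_name}={value}")
--         else:
--             value = arg.strip()
--             if should_keep_single_value_option(value):
--                 normalized.append(f"{option_name}={value}")
--         index += 1
--     return normalized
--
-- def should_keep_single_value_option(value: str) -> bool:
--     return bool(value) and value != "--"
-- ===== SOURCE B (Python) =====
-- def normalize_single_value_option(args: list[str], option_name: str) -> list[str]:
--     # Pass 1: state machine collecting raw values (a pending flag replaces lookahead).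
--     space_form = option_name + " "
--     eq_form = option_name + "="
--     values: list[str] = []
--     pending = False
--     for arg in args:
--         if pending:
--             values.append(arg)
--             pending = False
--         elif arg == option_name:
--             pending = True
--         elif arg.startswith(space_form):
--             values.append(arg[len(space_form):])
--         elif arg.startswith(eq_form):
--             values.append(arg.split("=", 1)[1])
--         else:
--             values.append(arg)
--     # Pass 2: strip, filter, format.
--     return [f"{option_name}={v}" for v in (w.strip() for w in values)
--             if should_keep_single_value_option(v)]
--
--
-- def should_keep_single_value_option(value: str) -> bool:
--     return bool(value) and value != "--"
-- ===== Notes on version B (the rewrite author's own statement) =====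
-- stated objective: alternative
-- what changed: Replaces A's single index-based lookahead loop (peeking at args[index+1] and appending formatted output in place) by a two-pass decomposition: a pending-flag state machine that only collects raw option values, followed by a separate strip/filter/format comprehension.
import Mathlib
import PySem

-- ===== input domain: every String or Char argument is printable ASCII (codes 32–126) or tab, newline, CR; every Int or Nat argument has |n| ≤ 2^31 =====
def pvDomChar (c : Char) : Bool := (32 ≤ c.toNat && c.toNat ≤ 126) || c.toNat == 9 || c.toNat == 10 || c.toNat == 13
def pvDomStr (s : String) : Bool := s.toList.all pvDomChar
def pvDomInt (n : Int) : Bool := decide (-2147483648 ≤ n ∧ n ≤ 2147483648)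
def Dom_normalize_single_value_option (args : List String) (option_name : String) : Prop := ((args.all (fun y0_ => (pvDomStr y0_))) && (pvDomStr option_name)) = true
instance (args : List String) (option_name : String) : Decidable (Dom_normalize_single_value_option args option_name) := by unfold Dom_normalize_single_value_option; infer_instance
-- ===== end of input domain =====

-- B replaces A's index-lookahead loop by a two-pass decomposition (a pending-flag state
-- machine collecting raw values, then one strip/filter/format comprehension); objective:
-- alternative decomposition, same asymptotic cost.

-- ===== PORT A =====
-- shared helper: should_keep_single_value_option (identical in both Python files)
def should_keep_single_value_option (value : String) : Bool :=
  (!(value == "")) && (!(value == "--"))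

-- hand port of str.removeprefix (not in PySem): exact — drops len(p) chars iff p is a prefix
def pyRemoveprefix (s p : String) : String :=
  if PySem.Str.startswith s p then PySem.Str.slice s (some (PySem.Str.len p)) none else s

-- arg.split("=", 1)[1]; both Pythons only evaluate it under a startswith-"...=" guard,
-- so the split has a second part and Python's [1] cannot raise (defaults are never hit)
def splitEqSecond (arg : String) : String :=
  ((PySem.Str.splitMax? arg "=" 1).getD []).getD 1 ""

def normSVOLoop (option_name : String) : List String → List String → List String
  | [], normalized => normalized
  | arg :: rest, normalized =>
    if arg == option_name then
      match rest with
      | nxt :: rest' =>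
        let value := PySem.Str.strip nxt
        normSVOLoop option_name rest'
          (if should_keep_single_value_option value then
            normalized ++ [option_name ++ "=" ++ value] else normalized)
      | [] => normalized
    else if PySem.Str.startswith arg (option_name ++ " ") then
      let value := PySem.Str.strip (pyRemoveprefix arg (option_name ++ " "))
      normSVOLoop option_name rest
        (if should_keep_single_value_option value then
          normalized ++ [option_name ++ "=" ++ value] else normalized)
    else if PySem.Str.startswith arg (option_name ++ "=") then
      let value := PySem.Str.strip (splitEqSecond arg)
      normSVOLoop option_name rest
        (if should_keep_single_value_option value then
          normalized ++ [option_name ++ "=" ++ value] else normalized)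
    else
      let value := PySem.Str.strip arg
      normSVOLoop option_name rest
        (if should_keep_single_value_option value then
          normalized ++ [option_name ++ "=" ++ value] else normalized)

def normalize_single_value_option (args : List String) (option_name : String) : List String :=
  normSVOLoop option_name args []

-- ===== PORT B =====
-- pass 1 step: the pending-flag state machine (state = collected values × pending)
def collectStep (option_name : String) (st : List String × Bool) (arg : String) :
    List String × Bool :=
  if st.2 then (st.1 ++ [arg], false)
  else if arg == option_name then (st.1, true)
  else if PySem.Str.startswith arg (option_name ++ " ") then
    (st.1 ++ [PySem.Str.slice arg (some (PySem.Str.len (option_name ++ " "))) none], false)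
  else if PySem.Str.startswith arg (option_name ++ "=") then
    (st.1 ++ [splitEqSecond arg], false)
  else (st.1 ++ [arg], false)

def normalize_single_value_option_alt (args : List String) (option_name : String) :
    List String :=
  let values := (args.foldl (collectStep option_name) ([], false)).1
  ((values.map PySem.Str.strip).filter should_keep_single_value_option).map
    (fun v => option_name ++ "=" ++ v)

-- ===== PRECONDITION & SPEC =====
def Spec_normalize_single_value_option (args : List String) (option_name : String) (out : List String) : Prop := out = normalize_single_value_option_alt args option_name
instance (args : List String) (option_name : String) (out : List String) : Decidable (Spec_normalize_single_value_option args option_name out) := by unfold Spec_normalize_single_value_option; infer_instance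

-- ===== CLAIM (what is proved, stated in full; the proofs are below) =====
def Claim_equal_normalize_single_value_option : Prop := ∀ (args : List String) (option_name : String), Dom_normalize_single_value_option args option_name → Spec_normalize_single_value_option args option_name (normalize_single_value_option args option_name)

-- ===== LEMMAS AND PROOFS =====

-- B's second pass, as a function of the collected values
def fmtVals (option_name : String) (vs : List String) : List String :=
  ((vs.map PySem.Str.strip).filter should_keep_single_value_option).map
    (fun v => option_name ++ "=" ++ v)

lemma fmtVals_append (name : String) (vs ws : List String) :
    fmtVals name (vs ++ ws) = fmtVals name vs ++ fmtVals name ws := by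
  simp [fmtVals]

lemma fmtVals_singleton (name v : String) :
    fmtVals name [v] =
      if should_keep_single_value_option (PySem.Str.strip v) then
        [name ++ "=" ++ PySem.Str.strip v] else [] := by
  by_cases h : should_keep_single_value_option (PySem.Str.strip v) <;>
    simp [fmtVals, h]

-- main invariant: A's accumulator loop equals B's state machine (pending = false),
-- both offset by already-produced output acc / already-collected values vs
lemma loop_eq (name : String) : ∀ (n : Nat) (l : List String), l.length ≤ n →
    ∀ (acc vs : List String),
    normSVOLoop name l (acc ++ fmtVals name vs) =
      acc ++ fmtVals name ((l.foldl (collectStep name) (vs, false)).1) := by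
  intro n
  induction n with
  | zero =>
    intro l hl acc vs
    have : l = [] := List.length_eq_zero_iff.mp (Nat.le_zero.mp hl)
    subst this
    simp [normSVOLoop]
  | succ n ih =>
    intro l hl acc vs
    match l with
    | [] => simp [normSVOLoop]
    | arg :: rest =>
      by_cases hname : arg == name
      · match rest with
        | [] =>
          simp [normSVOLoop, hname, List.foldl, collectStep]
        | nxt :: rest' =>
          have hlen : rest'.length ≤ n := by
            simp at hl; omega
          have step :
              normSVOLoop name (arg :: nxt :: rest') (acc ++ fmtVals name vs) =
                normSVOLoop name rest' (acc ++ fmtVals name (vs ++ [nxt])) := by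
            simp only [normSVOLoop, hname, if_pos]
            rw [fmtVals_append, fmtVals_singleton]
            by_cases hk : should_keep_single_value_option (PySem.Str.strip nxt) <;>
              simp [hk]
          rw [step, ih rest' hlen acc (vs ++ [nxt])]
          simp [List.foldl, collectStep, hname]
      · have hlen : rest.length ≤ n := by simp at hl; omega
        by_cases hsp : PySem.Str.startswith arg (name ++ " ")
        · have step :
              normSVOLoop name (arg :: rest) (acc ++ fmtVals name vs) =
                normSVOLoop name rest
                  (acc ++ fmtVals name
                    (vs ++ [PySem.Str.slice arg (some (PySem.Str.len (name ++ " "))) none])) := by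
            rw [normSVOLoop.eq_def]
            simp only [hname, hsp, if_pos, if_neg, Bool.false_eq_true, not_false_eq_true]
            rw [pyRemoveprefix, if_pos hsp, fmtVals_append, fmtVals_singleton]
            split <;> simp_all
          rw [step, ih rest hlen acc _]
          have hsp' := hsp; simp at hsp'
          simp [List.foldl, collectStep, hname, hsp']
        · by_cases heq : PySem.Str.startswith arg (name ++ "=")
          · have step :
                normSVOLoop name (arg :: rest) (acc ++ fmtVals name vs) =
                  normSVOLoop name rest
                    (acc ++ fmtVals name (vs ++ [splitEqSecond arg])) := by
              rw [normSVOLoop.eq_def]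
              simp only [hname, hsp, heq, if_pos, if_neg, Bool.false_eq_true,
                not_false_eq_true]
              rw [fmtVals_append, fmtVals_singleton]
              by_cases hk : should_keep_single_value_option
                (PySem.Str.strip (splitEqSecond arg)) <;> simp [hk]
            rw [step, ih rest hlen acc _]
            have hsp' := hsp; simp at hsp'
            have heq' := heq; simp at heq'
            simp [List.foldl, collectStep, hname, hsp', heq']
          · have step :
                normSVOLoop name (arg :: rest) (acc ++ fmtVals name vs) =
                  normSVOLoop name rest (acc ++ fmtVals name (vs ++ [arg])) := by
              rw [normSVOLoop.eq_def]
              simp only [hname, hsp, heq, if_neg, Bool.false_eq_true, not_false_eq_true]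
              rw [fmtVals_append, fmtVals_singleton]
              by_cases hk : should_keep_single_value_option (PySem.Str.strip arg) <;>
                simp [hk]
            rw [step, ih rest hlen acc _]
            have hsp' := hsp; simp at hsp'
            have heq' := heq; simp at heq'
            simp [List.foldl, collectStep, hname, hsp', heq']

-- ===== VERDICT (by name: the statement is the Claim_ definition above) =====
theorem normalize_single_value_option_spec : Claim_equal_normalize_single_value_option := by
  intro args name _
  unfold Spec_normalize_single_value_option
  have h := loop_eq name args.length args (le_refl _) [] []
  simpa [normalize_single_value_option, normalize_single_value_option_alt, fmtVals] using h
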